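-- pv_equiv track=rewrite | github.com/c788630/Numclass | src/numclass/classifiers/diophantine.py | _legendre_three_square_possible
-- ===== SOURCE A (Python) =====
-- def _legendre_three_square_possible(n: int) -> bool:
--     """Legendre: n is sum of three squares iff n ≠ 4^a(8b+7)."""
--     if n < 0:
--         return False
--     if n == 0:
--         return True
--     while n % 4 == 0:
--         n //= 4
--     return (n % 8) != 7
-- ===== SOURCE B (Python) =====
-- def _legendre_three_square_possible(n: int) -> bool:
--     """Legendre: n is sum of three squares iff n != 4^a(8b+7).
--
--     Checks the characterisation directly: enumerate powers of four p = 4^a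
--     up to n and reject n as soon as some cofactor n // p (with p | n) is
--     congruent to 7 mod 8.  Correct because a cofactor == 7 (mod 8) is odd,
--     so p is then the exact power of 4 in n."""
--     if n < 0:
--         return False
--     if n == 0:
--         return True
--     p = 1
--     while p <= n:
--         if n % p == 0 and (n // p) % 8 == 7:
--             return False
--         p *= 4
--     return True
-- ===== Notes on version B (the rewrite author's own statement) =====
-- stated objective: alternative
-- what changed: Instead of stripping factors of 4 in place and testing the remainder mod 8, B tests Legendre's characterisation directly: it enumerates ascending powers of four p=1,4,16,... up to n and returns False as soon as some dividing power has cofactor n//p congruent to 7 mod 8.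
import Mathlib
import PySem

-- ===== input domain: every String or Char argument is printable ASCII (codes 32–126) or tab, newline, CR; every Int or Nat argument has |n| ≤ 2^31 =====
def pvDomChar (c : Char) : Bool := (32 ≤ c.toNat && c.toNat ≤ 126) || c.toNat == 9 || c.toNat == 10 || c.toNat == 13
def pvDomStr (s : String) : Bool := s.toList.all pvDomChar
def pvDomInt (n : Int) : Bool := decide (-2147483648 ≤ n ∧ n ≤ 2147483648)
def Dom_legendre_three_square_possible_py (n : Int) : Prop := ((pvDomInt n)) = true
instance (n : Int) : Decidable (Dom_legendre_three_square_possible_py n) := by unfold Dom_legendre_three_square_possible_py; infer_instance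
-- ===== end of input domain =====

-- B checks Legendre's form n = 4^a(8b+7) directly, scanning ascending powers of four
-- as candidate divisors, instead of A's destructive divide-by-4 loop (alternative algorithm, same cost class).

-- ===== PORT A =====
-- A's 'while n % 4 == 0: n //= 4'; only reached with n > 0, where Python's
-- // and % on nonnegative ints agree exactly with Nat division and mod
def pvStrip4 (m : Nat) : Nat :=
  if h : m % 4 = 0 ∧ 0 < m then pvStrip4 (m / 4) else m
termination_by m
decreasing_by exact Nat.div_lt_self h.2 (by omega)

def legendre_three_square_possible_py (n : Int) : Bool :=
  if n < 0 then false
  else if n = 0 then true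
  else decide (pvStrip4 n.toNat % 8 ≠ 7)

-- ===== PORT B =====
-- B's 'while p <= n' loop over powers of four; the 0 < p conjunct is a pure
-- totality guard (Python starts the loop at p = 1 and p only grows)
def pvScan4 (m p : Nat) : Bool :=
  if h : 0 < p ∧ p ≤ m then
    if m % p = 0 ∧ m / p % 8 = 7 then false else pvScan4 m (p * 4)
  else true
termination_by m + 1 - p
decreasing_by omega

def legendre_three_square_possible_py_alt (n : Int) : Bool :=
  if n < 0 then false
  else if n = 0 then true
  else pvScan4 n.toNat 1

-- ===== PRECONDITION & SPEC =====
def Spec_legendre_three_square_possible_py (n : Int) (out : Bool) : Prop := out = legendre_three_square_possible_py_alt n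
instance (n : Int) (out : Bool) : Decidable (Spec_legendre_three_square_possible_py n out) := by unfold Spec_legendre_three_square_possible_py; infer_instance

-- ===== CLAIM (what is proved, stated in full; the proofs are below) =====
def Claim_equal_legendre_three_square_possible_py : Prop := ∀ (n : Int), Dom_legendre_three_square_possible_py n → Spec_legendre_three_square_possible_py n (legendre_three_square_possible_py n)

-- ===== LEMMAS AND PROOFS =====

lemma pvStrip4_eq (m : Nat) : pvStrip4 m = if m % 4 = 0 ∧ 0 < m then pvStrip4 (m / 4) else m := by
  rw [pvStrip4]; split_ifs <;> simp

lemma pvScan4_eq (m p : Nat) : pvScan4 m p =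
    if 0 < p ∧ p ≤ m then
      (if m % p = 0 ∧ m / p % 8 = 7 then false else pvScan4 m (p * 4))
    else true := by
  rw [pvScan4]; split_ifs <;> simp

-- once the candidate power is a multiple of 4 but m is not, no later power divides m
lemma pvScan4_nodiv (m : Nat) (hm : m % 4 ≠ 0) :
    ∀ fuel p, m + 1 - p ≤ fuel → 4 ∣ p → pvScan4 m p = true := by
  intro fuel
  induction fuel with
  | zero =>
    intro p hf h4
    rw [pvScan4_eq, if_neg (by omega)]
  | succ k ih =>
    intro p hf h4
    rw [pvScan4_eq]
    split_ifs with h1 h2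
    · exfalso
      have : (4 : Nat) ∣ m := dvd_trans h4 (Nat.dvd_of_mod_eq_zero h2.1)
      omega
    · exact ih (p * 4) (by omega) ⟨p, by ring⟩
    · rfl

-- scanning 4*k from power 4*p is scanning k from power p
lemma pvScan4_div4 (k : Nat) :
    ∀ fuel p, k + 1 - p ≤ fuel → 0 < p → pvScan4 (4 * k) (p * 4) = pvScan4 k p := by
  intro fuel
  induction fuel with
  | zero =>
    intro p hf hp
    rw [pvScan4_eq (4 * k) (p * 4), pvScan4_eq k p, if_neg (by omega), if_neg (by omega)]
  | succ j ih =>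
    intro p hf hp
    rw [pvScan4_eq (4 * k) (p * 4), pvScan4_eq k p]
    by_cases hpk : p ≤ k
    · have hdvd : 4 * k % (p * 4) = 0 ↔ k % p = 0 := by
        rw [← Nat.dvd_iff_mod_eq_zero, ← Nat.dvd_iff_mod_eq_zero,
            show p * 4 = 4 * p by ring, Nat.mul_dvd_mul_iff_left (by omega : 0 < 4)]
      have hquot : 4 * k / (p * 4) = k / p := by
        rw [show p * 4 = 4 * p by ring, ← Nat.div_div_eq_div_mul,
            Nat.mul_div_cancel_left k (by omega : 0 < 4)]
      rw [if_pos (show (0:Nat) < p * 4 ∧ p * 4 ≤ 4 * k from ⟨by omega, by omega⟩),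
          if_pos (show 0 < p ∧ p ≤ k from ⟨hp, hpk⟩)]
      simp only [hdvd, hquot]
      split_ifs with h
      · rfl
      · exact ih (p * 4) (by omega) (by omega)
    · rw [if_neg (by omega), if_neg (by omega)]

-- core: for positive m, A's stripped-mod-8 test equals B's power-of-four scan
lemma pv_key (m : Nat) (hm : 0 < m) :
    (decide (pvStrip4 m % 8 ≠ 7)) = pvScan4 m 1 := by
  induction m using Nat.strong_induction_on with
  | _ m ih =>
    rw [pvScan4_eq, if_pos ⟨by omega, by omega⟩]
    have h1 : m % 1 = 0 := Nat.mod_one m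
    have hq : m / 1 = m := Nat.div_one m
    by_cases h7 : m % 8 = 7
    · -- B rejects at p = 1; A: m is odd, strip is identity
      rw [if_pos ⟨h1, by omega⟩]
      have hs : pvStrip4 m = m := by rw [pvStrip4_eq, if_neg (by omega)]
      simp [hs, h7]
    · rw [if_neg (by omega)]
      by_cases h4 : m % 4 = 0
      · -- m = 4k: strip recurses; scan from 4 on m = scan from 1 on m/4
        have hk : 0 < m / 4 := by omega
        have hs : pvStrip4 m = pvStrip4 (m / 4) := by
          rw [pvStrip4_eq, if_pos ⟨h4, hm⟩]
        have h4k : 4 * (m / 4) = m := by omega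
        have hscan : pvScan4 m (1 * 4) = pvScan4 (m / 4) 1 := by
          have h := pvScan4_div4 (m / 4) (m / 4 + 1) 1 (by omega) (by omega)
          rw [h4k] at h; exact h
        rw [hs, show (4 : Nat) = 1 * 4 by rfl, hscan]
        exact ih (m / 4) (by omega) hk
      · -- strip is identity and m % 8 ≠ 7; scan finds no further divisor
        have hs : pvStrip4 m = m := by rw [pvStrip4_eq, if_neg (by omega)]
        have := pvScan4_nodiv m h4 (m + 1) 4 (by omega) ⟨1, by ring⟩
        simp [hs, h7, show (1 : Nat) * 4 = 4 by rfl, this]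

-- ===== VERDICT (by name: the statement is the Claim_ definition above) =====
theorem legendre_three_square_possible_py_spec : Claim_equal_legendre_three_square_possible_py := by
  intro n _
  unfold Spec_legendre_three_square_possible_py legendre_three_square_possible_py legendre_three_square_possible_py_alt
  by_cases hneg : n < 0
  · simp [hneg]
  · by_cases hz : n = 0
    · simp [hz]
    · have hpos : 0 < n.toNat := by omega
      simp only [if_neg hneg, if_neg hz]
      exact pv_key n.toNat hpos
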